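-- pv_equiv track=rewrite | github.com/dirediredock/Census-Stub | EVAL_GraphAtlasCollider/TinyGraphCollider_collisions.py | Filter_Collisions
-- ===== SOURCE A (Python) =====
-- def Filter_Collisions(atlas_keys):
--     dict_collisions = {}
--     for idx, signal_key in enumerate(atlas_keys):
--         if idx not in atlas_disconnected:
--             if signal_key in dict_collisions:
--                 dict_collisions[signal_key].append(idx)
--             else:
--                 dict_collisions[signal_key] = [idx]
--     filtered_collisions = {}
--     for key, value in dict_collisions.items():
--         if len(value) >= 2:
--             filtered_collisions[key] = value
--     return filtered_collisions
--
-- atlas_disconnected = []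
-- ===== SOURCE B (Python) =====
-- atlas_disconnected = []
--
-- def Filter_Collisions(atlas_keys):
--     counts = {}
--     for idx, signal_key in enumerate(atlas_keys):
--         if idx not in atlas_disconnected:
--             counts[signal_key] = counts.get(signal_key, 0) + 1
--     result = {}
--     for idx, signal_key in enumerate(atlas_keys):
--         if idx not in atlas_disconnected:
--             if counts.get(signal_key, 0) >= 2:
--                 result.setdefault(signal_key, []).append(idx)
--     return result
-- ===== Notes on version B (the rewrite author's own statement) =====
-- stated objective: alternative
-- what changed: A builds full index-list groups in one pass and then filters groups by size; B first counts occurrences per key and then, in a second differently-shaped pass over enumerate(atlas_keys), appends indices only for keys whose count is >= 2, so only duplicated keys ever get a list built.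
import Mathlib
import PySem

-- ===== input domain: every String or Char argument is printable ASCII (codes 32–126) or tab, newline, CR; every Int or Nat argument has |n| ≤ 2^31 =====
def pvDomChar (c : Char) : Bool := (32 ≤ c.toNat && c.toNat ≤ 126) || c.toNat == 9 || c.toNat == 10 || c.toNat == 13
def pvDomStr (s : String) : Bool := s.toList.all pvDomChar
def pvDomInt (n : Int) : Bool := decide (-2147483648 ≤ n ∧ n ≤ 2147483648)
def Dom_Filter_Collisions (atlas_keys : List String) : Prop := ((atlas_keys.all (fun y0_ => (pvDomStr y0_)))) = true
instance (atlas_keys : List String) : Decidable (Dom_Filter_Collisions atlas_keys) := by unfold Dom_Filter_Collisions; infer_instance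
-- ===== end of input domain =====

-- B replaces A's group-then-filter (collect every index list, then keep the long ones) by a
-- count-then-rebuild decomposition: a counting pass, then a second pass that only appends
-- indices for keys whose count is >= 2 (objective: alternative, same asymptotic cost).

-- ===== PORT A =====
-- module constant in the Python source: atlas_disconnected = []
def pvAtlasDisconnected : List Int := []

def Filter_Collisions (atlas_keys : List String) : List (String × List Int) :=
  let dict_collisions : PySem.Dict String (List Int) :=
    (PySem.List.enumerate atlas_keys 0).foldl
      (fun d p =>
        if pvAtlasDisconnected.contains p.1 then d
        else if d.contains p.2 then d.modify p.2 [] (fun v => v ++ [p.1])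
        else d.insert p.2 [p.1])
      PySem.Dict.empty
  let filtered_collisions : PySem.Dict String (List Int) :=
    dict_collisions.items.foldl
      (fun r p => if 2 ≤ p.2.length then r.insert p.1 p.2 else r)
      PySem.Dict.empty
  filtered_collisions.items

-- ===== PORT B =====
-- second pass reads counts[signal_key] via getD: the key is always present there (same guard
-- admitted it in the counting pass), so getD computes exactly what the Python lookup returns
def Filter_Collisions_alt (atlas_keys : List String) : List (String × List Int) :=
  let counts : PySem.Dict String Int :=
    (PySem.List.enumerate atlas_keys 0).foldl
      (fun d p =>
        if pvAtlasDisconnected.contains p.1 then d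
        else d.insert p.2 (d.getD p.2 0 + 1))
      PySem.Dict.empty
  let result : PySem.Dict String (List Int) :=
    (PySem.List.enumerate atlas_keys 0).foldl
      (fun r p =>
        if pvAtlasDisconnected.contains p.1 then r
        else if 2 ≤ counts.getD p.2 0 then r.modify p.2 [] (fun v => v ++ [p.1])
        else r)
      PySem.Dict.empty
  result.items

-- ===== PRECONDITION & SPEC =====
def Spec_Filter_Collisions (atlas_keys : List String) (out : List (String × List Int)) : Prop := out = Filter_Collisions_alt atlas_keys
instance (atlas_keys : List String) (out : List (String × List Int)) : Decidable (Spec_Filter_Collisions atlas_keys out) := by unfold Spec_Filter_Collisions; infer_instance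

-- ===== CLAIM (what is proved, stated in full; the proofs are below) =====
def Claim_equal_Filter_Collisions : Prop := ∀ (atlas_keys : List String), Dom_Filter_Collisions atlas_keys → Spec_Filter_Collisions atlas_keys (Filter_Collisions atlas_keys)

-- ===== LEMMAS AND PROOFS =====

-- indices at which key k occurs in an enumerated list l
def pvOcc (l : List (Int × String)) (k : String) : List Int :=
  (l.filter (fun p => p.2 == k)).map (·.1)

-- the grouping fold both programs share (A runs it on the whole enumerate, B on a filtered one)
def pvGrp (l : List (Int × String)) : PySem.Dict String (List Int) :=
  l.foldl (fun d p => d.modify p.2 [] (fun v => v ++ [p.1])) PySem.Dict.empty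

lemma pvGrp_getD (l : List (Int × String)) (k : String) :
    (pvGrp l).getD k [] = pvOcc l k := by
  unfold pvGrp pvOcc
  have h : l.foldl (fun d p => d.modify p.2 [] (fun v => v ++ [p.1])) PySem.Dict.empty
      = (l.map Prod.swap).foldl (fun d p => d.modify p.1 [] (fun v => v ++ [p.2])) PySem.Dict.empty := by
    rw [List.foldl_map]; rfl
  rw [h, PySem.Dict.getD_foldl_modify_append]
  simp [List.filter_map, List.map_map, Function.comp_def, Prod.swap]

lemma pvGrp_keys (l : List (Int × String)) :
    (pvGrp l).keys = PySem.Set.ofList (l.map (·.2)) := by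
  unfold pvGrp
  rw [PySem.Dict.keys_foldl_modify_key l (fun p => p.2) [] (fun _ p => (fun v => v ++ [p.1]))]
  simp [PySem.Set.update_nil_left]

lemma pvGrp_nodup (l : List (Int × String)) : (pvGrp l).keys.Nodup := by
  unfold pvGrp
  exact PySem.Dict.nodup_keys_foldl_modify_key l (fun p => p.2) [] (fun _ p => (fun v => v ++ [p.1])) _ (by simp)

lemma pvGrp_items (l : List (Int × String)) :
    (pvGrp l).items
      = (PySem.Set.ofList (l.map (·.2))).map (fun k => (k, pvOcc l k)) := by
  rw [PySem.Dict.items_eq_map_keys _ (pvGrp_nodup l) [], pvGrp_keys]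
  exact List.map_congr_left (fun k _ => by rw [pvGrp_getD])

-- building a set from a filtered list = filtering the set (first-insertion order survives)
lemma pvSet_ofList_filter (xs : List String) (q : String → Bool) :
    PySem.Set.ofList (xs.filter q) = (PySem.Set.ofList xs).filter q := by
  induction xs using List.reverseRecOn with
  | nil => rfl
  | append_singleton xs x ih =>
    rw [List.filter_append, PySem.Set.ofList_append_singleton]
    by_cases hq : q x = true
    · simp only [List.filter_cons, hq, if_pos, List.filter_nil]
      rw [PySem.Set.ofList_append_singleton, ih]
      by_cases hx : x ∈ PySem.Set.ofList xs
      · have hx' : x ∈ (PySem.Set.ofList xs).filter q := List.mem_filter.2 ⟨hx, hq⟩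
        rw [PySem.Set.add_of_mem hx', PySem.Set.add_of_mem hx]
      · have hx' : x ∉ (PySem.Set.ofList xs).filter q := fun h => hx (List.mem_filter.1 h).1
        rw [PySem.Set.add_of_not_mem hx', PySem.Set.add_of_not_mem hx, List.filter_append]
        simp [hq]
    · simp only [List.filter_cons, hq, if_false, Bool.false_eq_true, List.filter_nil, List.append_nil]
      rw [ih, PySem.Set.add_eq_ite]
      by_cases hx : x ∈ PySem.Set.ofList xs
      · rw [if_pos hx]
      · rw [if_neg hx, List.filter_append]
        simp [hq]

-- A's second loop: an insert-if fold over fresh distinct keys appends exactly the kept items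
lemma pvFoldl_insert_if_items (l : List (String × List Int)) (d : PySem.Dict String (List Int))
    (h : ∀ p ∈ l, d.contains p.1 = false) (hnd : (l.map (·.1)).Nodup) :
    (l.foldl (fun r p => if 2 ≤ p.2.length then r.insert p.1 p.2 else r) d).items
      = d.items ++ l.filter (fun p => 2 ≤ p.2.length) := by
  induction l generalizing d with
  | nil => simp
  | cons p l ih =>
    simp only [List.map_cons, List.nodup_cons] at hnd
    have hp : d.contains p.1 = false := h p (by simp)
    have hrest : ∀ q ∈ l, q.1 ≠ p.1 := by
      intro q hq heq
      exact hnd.1 (heq ▸ List.mem_map_of_mem hq)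
    by_cases hlen : 2 ≤ p.2.length
    · simp only [List.foldl_cons, if_pos hlen, List.filter_cons, decide_eq_true hlen]
      rw [ih _ (fun q hq => by
        rw [PySem.Dict.contains_insert]
        simp [hrest q hq, h q (List.mem_cons_of_mem _ hq)]) hnd.2]
      rw [PySem.Dict.items_insert_of_not_contains _ _ hp]
      simp
    · simp only [List.foldl_cons, if_neg hlen, List.filter_cons]
      rw [if_neg (by simpa using hlen)]
      exact ih _ (fun q hq => h q (List.mem_cons_of_mem _ hq)) hnd.2

lemma pvOcc_length (l : List (Int × String)) (k : String) :
    (pvOcc l k).length = (l.map (·.2)).count k := by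
  unfold pvOcc
  rw [List.length_map, ← List.countP_eq_length_filter, List.count, List.countP_map]
  rfl

lemma pvOcc_filter (l : List (Int × String)) (q : String → Bool) (k : String) (hq : q k = true) :
    pvOcc (l.filter (fun p => q p.2)) k = pvOcc l k := by
  unfold pvOcc
  rw [List.filter_filter]
  congr 1
  apply List.filter_congr
  intro p _
  by_cases h : p.2 = k
  · simp [h, hq]
  · simp [h]

-- A's first loop body, with the (empty) disconnected-list guard gone, IS the grouping modify
lemma pvStepA_eq :
    (fun (d : PySem.Dict String (List Int)) (p : Int × String) =>
      if pvAtlasDisconnected.contains p.1 then d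
      else if d.contains p.2 then d.modify p.2 [] (fun v => v ++ [p.1])
      else d.insert p.2 [p.1])
    = fun d p => d.modify p.2 [] (fun v => v ++ [p.1]) := by
  funext d p
  simp only [pvAtlasDisconnected, List.contains_nil, Bool.false_eq_true, if_false]
  by_cases hc : d.contains p.2 = true
  · simp [hc]
  · have hc' : d.contains p.2 = false := by simpa using hc
    simp [hc', PySem.Dict.modify, PySem.Dict.getD_of_not_contains d [] hc']

lemma pvMain (keys : List String) : Filter_Collisions keys = Filter_Collisions_alt keys := by
  have he : (PySem.List.enumerate keys 0).map (fun p => p.2) = keys := PySem.List.map_snd_enumerate keys 0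
  set e := PySem.List.enumerate keys 0 with hedef
  have hcounts : ∀ k, (e.foldl
      (fun (d : PySem.Dict String Int) p =>
        if pvAtlasDisconnected.contains p.1 then d
        else d.insert p.2 (d.getD p.2 0 + 1)) PySem.Dict.empty).getD k 0 = (keys.count k : Int) := by
    intro k
    have hfn : (e.foldl
        (fun (d : PySem.Dict String Int) p =>
          if pvAtlasDisconnected.contains p.1 then d
          else d.insert p.2 (d.getD p.2 0 + 1)) PySem.Dict.empty)
        = (e.map (fun p => p.2)).foldl (fun d x => d.insert x (d.getD x 0 + 1)) PySem.Dict.empty := by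
      rw [List.foldl_map]
      simp [pvAtlasDisconnected]
    rw [hfn, he, PySem.Dict.getD_foldl_insert_add_one]
    simp
  have hA : Filter_Collisions keys
      = ((PySem.Set.ofList keys).filter (fun k => decide (2 ≤ (pvOcc e k).length))).map
          (fun k => (k, pvOcc e k)) := by
    show (((e.foldl
      (fun d p =>
        if pvAtlasDisconnected.contains p.1 then d
        else if d.contains p.2 then d.modify p.2 [] (fun v => v ++ [p.1])
        else d.insert p.2 [p.1]) PySem.Dict.empty).items.foldl
        (fun r p => if 2 ≤ p.2.length then r.insert p.1 p.2 else r) PySem.Dict.empty).items) = _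
    rw [pvStepA_eq]
    have hgrp : e.foldl (fun d p => d.modify p.2 [] (fun v => v ++ [p.1])) PySem.Dict.empty = pvGrp e := rfl
    rw [hgrp]
    rw [pvFoldl_insert_if_items _ _ (by simp [PySem.Dict.contains_empty])
      (by have := pvGrp_nodup e; simpa [PySem.Dict.keys] using this)]
    rw [pvGrp_items e, List.filter_map, he]
    simp [PySem.Dict.empty, Function.comp_def]
  have hB : Filter_Collisions_alt keys
      = (PySem.Set.ofList (keys.filter (fun k => decide (2 ≤ (keys.count k : Int))))).map
          (fun k => (k, pvOcc (e.filter (fun p => decide (2 ≤ (keys.count p.2 : Int)))) k)) := by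
    show ((e.foldl
      (fun r p =>
        if pvAtlasDisconnected.contains p.1 then r
        else if 2 ≤ (e.foldl
          (fun (d : PySem.Dict String Int) p =>
            if pvAtlasDisconnected.contains p.1 then d
            else d.insert p.2 (d.getD p.2 0 + 1)) PySem.Dict.empty).getD p.2 0
          then r.modify p.2 [] (fun v => v ++ [p.1]) else r) PySem.Dict.empty).items) = _
    have hstep : (fun (r : PySem.Dict String (List Int)) (p : Int × String) =>
        if pvAtlasDisconnected.contains p.1 then r
        else if 2 ≤ (e.foldl
          (fun (d : PySem.Dict String Int) p =>
            if pvAtlasDisconnected.contains p.1 then d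
            else d.insert p.2 (d.getD p.2 0 + 1)) PySem.Dict.empty).getD p.2 0
          then r.modify p.2 [] (fun v => v ++ [p.1]) else r)
        = fun r p => if (fun p : Int × String => decide (2 ≤ (keys.count p.2 : Int))) p = true
            then r.modify p.2 [] (fun v => v ++ [p.1]) else r := by
      funext r p
      rw [hcounts p.2]
      simp [pvAtlasDisconnected]
    rw [hstep, ← List.foldl_filter]
    have hgrp : (e.filter (fun p => decide (2 ≤ (keys.count p.2 : Int)))).foldl
        (fun r p => r.modify p.2 [] (fun v => v ++ [p.1])) PySem.Dict.empty
        = pvGrp (e.filter (fun p => decide (2 ≤ (keys.count p.2 : Int)))) := rfl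
    rw [hgrp, pvGrp_items]
    have hmap : (e.filter (fun p => decide (2 ≤ (keys.count p.2 : Int)))).map (fun p => p.2)
        = keys.filter (fun k => decide (2 ≤ (keys.count k : Int))) := by
      rw [← he, List.filter_map]
      rfl
    rw [hmap]
  rw [hA, hB, pvSet_ofList_filter]
  have hq : ∀ k, (decide (2 ≤ (pvOcc e k).length)) = (decide (2 ≤ (keys.count k : Int))) := by
    intro k
    rw [pvOcc_length, hedef, he]
    exact decide_eq_decide.2 (by exact_mod_cast Iff.rfl)
  rw [List.filter_congr (fun k _ => hq k)]
  apply List.map_congr_left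
  intro k hk
  have hqk : decide (2 ≤ (keys.count k : Int)) = true := (List.mem_filter.1 hk).2
  rw [pvOcc_filter e (fun k => decide (2 ≤ (keys.count k : Int))) k hqk]

-- ===== VERDICT (by name: the statement is the Claim_ definition above) =====
theorem Filter_Collisions_spec : Claim_equal_Filter_Collisions := by
  intro atlas_keys _
  unfold Spec_Filter_Collisions
  exact pvMain atlas_keys
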